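-- pv_equiv track=rewrite | github.com/Zhenye-Na/leetcode | 301.remove-invalid-parentheses.py | _get_max_length
-- ===== SOURCE A (Python) =====
-- def _get_max_length(s):
--     stack = []
--     length = 0
--     for i, char in enumerate(s):
--         if char not in "()":
--             length += 1
--         elif char == "(":
--             stack.append(char)
--         else:
--             if stack and stack[-1] == "(":
--                 stack.pop()
--                 length += 2
--
--     return length
-- ===== SOURCE B (Python) =====
-- def _drop_unmatched(chars, opener, closer):
--     kept = []
--     depth = 0
--     for c in chars:
--         if c == opener:
--             depth += 1
--         elif c == closer:
--             if depth == 0: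
--                 continue
--             depth -= 1
--         kept.append(c)
--     return kept
--
--
-- def _get_max_length(s):
--     # stage 1: left-to-right, drop every ')' with no matching '(' before it
--     t = _drop_unmatched(s, "(", ")")
--     # stage 2: right-to-left over what remains, drop every unmatched '('
--     u = _drop_unmatched(t[::-1], ")", "(")
--     return len(u)
-- ===== Notes on version B (the rewrite author's own statement) =====
-- stated objective: alternative
-- what changed: B runs two staged filter passes instead of A's single stack-and-accumulator loop: first it builds the sublist of s without unmatched ')', then it filters the reversed remainder to drop unmatched '(', and returns the length of the survivor list.
import Mathlib
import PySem

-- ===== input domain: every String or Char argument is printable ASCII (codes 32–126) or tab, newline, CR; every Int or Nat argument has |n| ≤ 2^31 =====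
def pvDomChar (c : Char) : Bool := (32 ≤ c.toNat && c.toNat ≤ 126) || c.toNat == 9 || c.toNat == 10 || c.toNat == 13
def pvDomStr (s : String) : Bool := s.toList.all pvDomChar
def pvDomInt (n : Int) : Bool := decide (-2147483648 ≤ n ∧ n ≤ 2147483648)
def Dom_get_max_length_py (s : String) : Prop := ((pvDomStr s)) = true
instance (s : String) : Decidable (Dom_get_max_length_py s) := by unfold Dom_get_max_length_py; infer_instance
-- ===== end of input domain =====

-- B replaces A's single stack-and-accumulator loop by two staged filter passes
-- (drop unmatched ')', then drop unmatched '(' over the reversal) and returns the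
-- survivor length (objective: alternative).

-- ===== PORT A =====
-- one loop iteration of A: state = (stack, length)
def pvAStep (st : List Char × Int) (c : Char) : List Char × Int :=
  if ¬ (['(', ')'].contains c) then (st.1, st.2 + 1)
  else if c = '(' then (st.1 ++ [c], st.2)
  else if st.1 ≠ [] ∧ st.1.getLast? = some '(' then (st.1.dropLast, st.2 + 2)
  else st

def get_max_length_py (s : String) : Int :=
  (s.toList.foldl pvAStep ([], 0)).2

-- ===== PORT B =====
-- one loop iteration of B's helper _drop_unmatched: state = (kept, depth)
def pvDropStep (opener closer : Char) (st : List Char × Int) (c : Char) : List Char × Int :=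
  if c = opener then (st.1 ++ [c], st.2 + 1)
  else if c = closer then (if st.2 = 0 then st else (st.1 ++ [c], st.2 - 1))
  else (st.1 ++ [c], st.2)

def pvDrop (chars : List Char) (opener closer : Char) : List Char :=
  (chars.foldl (pvDropStep opener closer) ([], 0)).1

def get_max_length_py_alt (s : String) : Int :=
  let t := pvDrop s.toList '(' ')'
  let u := pvDrop t.reverse ')' '('
  (u.length : Int)

-- ===== PRECONDITION & SPEC =====
def Spec_get_max_length_py (s : String) (out : Int) : Prop := out = get_max_length_py_alt s
instance (s : String) (out : Int) : Decidable (Spec_get_max_length_py s out) := by unfold Spec_get_max_length_py; infer_instance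

-- ===== CLAIM (what is proved, stated in full; the proofs are below) =====
def Claim_equal_get_max_length_py : Prop := ∀ (s : String), Dom_get_max_length_py s → Spec_get_max_length_py s (get_max_length_py s)

-- ===== LEMMAS AND PROOFS =====

-- paren balance of a list of characters
def pvBal (l : List Char) : Int := (l.count '(' : Int) - (l.count ')' : Int)

-- every prefix has nonnegative balance
def pvGood (l : List Char) : Prop := ∀ p : List Char, p <+: l → 0 ≤ pvBal p

theorem pvBal_append (a b : List Char) : pvBal (a ++ b) = pvBal a + pvBal b := by
  simp [pvBal, List.count_append]; ring

theorem pvGood_append (kept : List Char) (c : Char) (hg : pvGood kept)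
    (h : 0 ≤ pvBal (kept ++ [c])) : pvGood (kept ++ [c]) := by
  intro p hp
  rcases List.prefix_concat_iff.mp hp with h1 | h1
  · exact h1 ▸ h
  · exact hg p h1

theorem pvGood_nil : pvGood [] := by
  intro p hp
  simp [List.prefix_nil.mp hp, pvBal]

-- Stage-1 invariant: A's loop and B's first pass stay in lockstep: A's stack is
-- replicate k' '(' with k' = pass-1 depth, the kept list has good prefixes and
-- balance k', and kept.length - A_length - k' is invariant.
theorem pv_inv1 : ∀ (l : List Char) (k : Nat) (len : Int) (kept : List Char),
    pvGood kept → pvBal kept = (k : Int) →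
    ∃ k' : Nat,
      (l.foldl pvAStep (List.replicate k '(', len)).1 = List.replicate k' '(' ∧
      (l.foldl (pvDropStep '(' ')') (kept, (k : Int))).2 = (k' : Int) ∧
      pvGood (l.foldl (pvDropStep '(' ')') (kept, (k : Int))).1 ∧
      pvBal (l.foldl (pvDropStep '(' ')') (kept, (k : Int))).1 = (k' : Int) ∧
      (((l.foldl (pvDropStep '(' ')') (kept, (k : Int))).1.length : Int)
        = (kept.length : Int)
          + ((l.foldl pvAStep (List.replicate k '(', len)).2 - len)
          + ((k' : Int) - (k : Int))) := by
  intro l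
  induction l with
  | nil => intro k len kept hg hb; exact ⟨k, by simp_all⟩
  | cons c l ih =>
    intro k len kept hg hb
    by_cases hop : c = '('
    · subst hop
      have hg' : pvGood (kept ++ ['(']) := by
        apply pvGood_append _ _ hg
        rw [pvBal_append]; simp [pvBal] at hb ⊢; omega
      have hb' : pvBal (kept ++ ['(']) = ((k + 1 : Nat) : Int) := by
        rw [pvBal_append]; simp [pvBal] at hb ⊢; omega
      obtain ⟨k', h1, h2, h3, h4, h5⟩ := ih (k + 1) len (kept ++ ['(']) hg' hb'
      refine ⟨k', ?_, ?_, ?_, ?_, ?_⟩ <;>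
        simp only [List.foldl_cons, pvAStep, pvDropStep, List.contains_cons,
          List.replicate_succ'] at * <;>
        simp_all <;> omega
    · by_cases hcl : c = ')'
      · subst hcl
        cases k with
        | zero =>
          obtain ⟨k', h1, h2, h3, h4, h5⟩ := ih 0 len kept hg hb
          refine ⟨k', ?_, ?_, ?_, ?_, ?_⟩ <;>
            simp only [List.foldl_cons, pvAStep, pvDropStep] at * <;>
            simp_all <;> omega
        | succ k =>
          have hg' : pvGood (kept ++ [')']) := by
            apply pvGood_append _ _ hg
            rw [pvBal_append]; simp [pvBal] at hb ⊢; omega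
          have hb' : pvBal (kept ++ [')']) = (k : Int) := by
            rw [pvBal_append]; simp [pvBal] at hb ⊢; omega
          obtain ⟨k', h1, h2, h3, h4, h5⟩ := ih k (len + 2) (kept ++ [')']) hg' hb'
          have hL : (List.replicate (k+1) '(').dropLast = List.replicate k '(' := by
            simp [List.replicate_succ', List.dropLast_concat]
          have hG : (List.replicate (k+1) '(').getLast? = some '(' := by
            simp [List.replicate_succ']
          have hk1 : ((k+1 : Nat) : Int) ≠ 0 := by omega
          refine ⟨k', ?_, ?_, ?_, ?_, ?_⟩ <;>
            simp only [List.foldl_cons, pvAStep, pvDropStep, hL, hG] at * <;>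
            simp_all <;> omega
      · have hg' : pvGood (kept ++ [c]) := by
          apply pvGood_append _ _ hg
          rw [pvBal_append]; simp [pvBal, hop, hcl] at hb ⊢; omega
        have hb' : pvBal (kept ++ [c]) = (k : Int) := by
          rw [pvBal_append]; simp [pvBal, hop, hcl] at hb ⊢; omega
        obtain ⟨k', h1, h2, h3, h4, h5⟩ := ih k (len + 1) (kept ++ [c]) hg' hb'
        refine ⟨k', ?_, ?_, ?_, ?_, ?_⟩ <;>
          simp only [List.foldl_cons, pvAStep, pvDropStep] at * <;>
          simp_all <;> omega

-- Stage-2 lemma: on a good-prefix list l of balance d, the reverse pass starting at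
-- depth d2 keeps kept.length + l.length - max (d - d2) 0 characters.
theorem pv_inv2 : ∀ (l : List Char), pvGood l → ∀ (d2 : Nat) (kept : List Char),
    (((l.reverse.foldl (pvDropStep ')' '(') (kept, (d2 : Int))).1.length : Int)
      = (kept.length : Int) + (l.length : Int) - max (pvBal l - (d2 : Int)) 0) ∧
    (l.reverse.foldl (pvDropStep ')' '(') (kept, (d2 : Int))).2
      = max ((d2 : Int) - pvBal l) 0 := by
  intro l
  induction l using List.reverseRecOn with
  | nil =>
    intro _ d2 kept
    constructor <;> simp [pvBal] <;> omega
  | append_singleton init c ih =>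
    intro hg d2 kept
    have hgi : pvGood init := fun p hp => hg p (hp.trans (List.prefix_append init [c]))
    have hbi : 0 ≤ pvBal init := hgi init (List.prefix_refl init)
    have hbal : pvBal (init ++ [c]) = pvBal init + pvBal [c] := pvBal_append init [c]
    have hbl : 0 ≤ pvBal (init ++ [c]) := hg _ (List.prefix_refl _)
    rw [List.reverse_append]
    by_cases hop : c = '('
    · subst hop
      -- stage 2 treats '(' as closer
      by_cases hz : (d2 : Int) = 0
      · obtain ⟨ih1, ih2⟩ := ih hgi 0 kept
        constructor <;>
          simp only [List.reverse_singleton, List.singleton_append, List.foldl_cons,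
            pvDropStep, if_neg (by decide : ¬ ('(' = ')')), if_pos rfl, if_pos hz,
            hbal] at * <;>
          simp_all [pvBal] <;> omega
      · have hd : ∃ d2' : Nat, d2 = d2' + 1 := by
          refine ⟨d2 - 1, ?_⟩; omega
        obtain ⟨d2', rfl⟩ := hd
        obtain ⟨ih1, ih2⟩ := ih hgi d2' (kept ++ ['('])
        constructor <;>
          simp only [List.reverse_singleton, List.singleton_append, List.foldl_cons,
            pvDropStep, if_neg (by decide : ¬ ('(' = ')')), if_pos rfl, if_neg hz,
            hbal] at * <;>
          simp_all [pvBal] <;> omega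
    · by_cases hcl : c = ')'
      · subst hcl
        obtain ⟨ih1, ih2⟩ := ih hgi (d2 + 1) (kept ++ [')'])
        constructor <;>
          simp only [List.reverse_singleton, List.singleton_append, List.foldl_cons,
            pvDropStep, if_pos rfl, hbal] at * <;>
          simp_all [pvBal] <;> omega
      · obtain ⟨ih1, ih2⟩ := ih hgi d2 (kept ++ [c])
        constructor <;>
          simp only [List.reverse_singleton, List.singleton_append, List.foldl_cons,
            pvDropStep, if_neg (by simp [hcl] : ¬ (c = ')')),
            if_neg (by simp [hop] : ¬ (c = '(')), hbal] at * <;>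
          simp_all [pvBal, hop, hcl] <;> omega

-- ===== VERDICT (by name: the statement is the Claim_ definition above) =====
theorem get_max_length_py_spec : Claim_equal_get_max_length_py := by
  intro s _
  unfold Spec_get_max_length_py get_max_length_py get_max_length_py_alt pvDrop
  obtain ⟨k', h1, h2, h3, h4, h5⟩ :=
    pv_inv1 s.toList 0 0 [] pvGood_nil (by simp [pvBal])
  have hmain := (pv_inv2 (s.toList.foldl (pvDropStep '(' ')') ([], (0 : Int))).1 h3 0 []).1
  simp only [Nat.cast_zero, List.replicate_zero] at *
  rw [h4] at hmain
  simp only [List.length_nil, Nat.cast_zero, zero_add, sub_zero] at hmain h5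
  omega
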